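-- pv_equiv track=rewrite | github.com/akarasulu/zfs-helper | sbin/apply-delegation.py | pattern_prefix
-- ===== SOURCE A (Python) =====
-- from typing import Dict, List, Optional, Set, Tuple
--
-- def pattern_prefix(pattern: str, existing: Set[str]) -> Optional[str]:
--     parts = pattern.split("/")
--     prefix_parts: List[str] = []
--     for part in parts:
--         if part in {"**"} or any(ch in part for ch in "*?[]"):
--             break
--         prefix_parts.append(part)
--     while prefix_parts:
--         candidate = "/".join(prefix_parts)
--         if candidate in existing:
--             return candidate
--         prefix_parts.pop()
--     return None
-- ===== SOURCE B (Python) =====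
-- def pattern_prefix(pattern, existing):
--     best = None
--     current = None
--     for part in pattern.split("/"):
--         if part == "**" or any(ch in part for ch in "*?[]"):
--             break
--         current = part if current is None else current + "/" + part
--         if current in existing:
--             best = current
--     return best
-- ===== Notes on version B (the rewrite author's own statement) =====
-- stated objective: simpler
-- what changed: Replaces A's two-phase build-list-then-pop-and-rejoin search (re-joining the prefix list on every pop) with a single forward pass that extends one accumulator string per component and remembers the longest one found in the set.
import Mathlib
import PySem

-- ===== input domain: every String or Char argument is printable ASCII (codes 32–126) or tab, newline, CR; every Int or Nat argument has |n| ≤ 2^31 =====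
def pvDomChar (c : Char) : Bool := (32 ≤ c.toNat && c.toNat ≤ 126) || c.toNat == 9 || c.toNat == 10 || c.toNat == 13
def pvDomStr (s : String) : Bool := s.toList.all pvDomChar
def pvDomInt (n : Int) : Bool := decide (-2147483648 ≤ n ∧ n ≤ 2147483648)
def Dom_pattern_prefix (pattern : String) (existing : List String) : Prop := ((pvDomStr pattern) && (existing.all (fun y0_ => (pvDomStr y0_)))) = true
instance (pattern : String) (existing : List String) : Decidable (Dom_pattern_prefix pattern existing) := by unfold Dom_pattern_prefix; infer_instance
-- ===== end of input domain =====

-- B replaces A's build-prefix-list-then-pop-and-rejoin search with a single forward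
-- pass that extends one accumulator string and remembers the longest one in the set
-- (objective: simpler, one pass, no repeated joins).

-- ===== PORT A =====
-- for part in parts: break on glob component, else append to prefix_parts
def ppCollect (parts : List String) : List String :=
  match parts with
  | [] => []
  | p :: rest =>
    if p == "**" || (["*", "?", "[", "]"].any (fun ch => PySem.Str.isIn ch p)) then []
    else p :: ppCollect rest

-- while prefix_parts: candidate = "/".join(prefix_parts); if in existing return; pop
def ppSearch (existing : List String) (pp : List String) : Option String :=
  match pp with
  | [] => none
  | p :: rest =>
    let candidate := PySem.Str.join "/" (p :: rest)
    if existing.contains candidate then some candidate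
    else ppSearch existing (p :: rest).dropLast
termination_by pp.length
decreasing_by simp

def pattern_prefix (pattern : String) (existing : List String) : Option String :=
  let parts := (PySem.Str.split? pattern "/").getD []
  ppSearch existing (ppCollect parts)

-- ===== PORT B =====
-- single forward pass: current accumulator (None before the first part), best found
def ppGo (existing : List String) (parts : List String)
    (current : Option String) (best : Option String) : Option String :=
  match parts with
  | [] => best
  | p :: rest =>
    if p == "**" || (["*", "?", "[", "]"].any (fun ch => PySem.Str.isIn ch p)) then best
    else
      let cur := match current with | none => p | some c => c ++ "/" ++ p
      ppGo existing rest (some cur) (if existing.contains cur then some cur else best)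

def pattern_prefix_alt (pattern : String) (existing : List String) : Option String :=
  ppGo existing ((PySem.Str.split? pattern "/").getD []) none none

-- ===== PRECONDITION & SPEC =====
def Spec_pattern_prefix (pattern : String) (existing : List String) (out : Option String) : Prop := out = pattern_prefix_alt pattern existing
instance (pattern : String) (existing : List String) (out : Option String) : Decidable (Spec_pattern_prefix pattern existing out) := by unfold Spec_pattern_prefix; infer_instance

-- ===== CLAIM (what is proved, stated in full; the proofs are below) =====
def Claim_equal_pattern_prefix : Prop := ∀ (pattern : String) (existing : List String), Dom_pattern_prefix pattern existing → Spec_pattern_prefix pattern existing (pattern_prefix pattern existing)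

-- ===== LEMMAS AND PROOFS =====

-- the running accumulator of B's pass, starting from `cur`
def ppScan (cur : String) (xs : List String) : List String :=
  match xs with
  | [] => []
  | p :: rest => (cur ++ "/" ++ p) :: ppScan (cur ++ "/" ++ p) rest

-- all "/"-joins of the nonempty prefixes of pp (shortest first)
def ppAllJ (pp : List String) : List String :=
  match pp with
  | [] => []
  | q :: qs => q :: ppScan q qs

-- last candidate (longest prefix) wins
def ppRFind (existing : List String) (cs : List String) : Option String :=
  cs.reverse.find? (fun c => existing.contains c)

def ppF (cur : String) (xs : List String) : String :=
  xs.foldl (fun c p => c ++ "/" ++ p) cur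

theorem ppF_pull (xs : List String) : ∀ (a b : String), a ++ ppF b xs = ppF (a ++ b) xs := by
  induction xs with
  | nil => intro a b; rfl
  | cons p rest ih =>
    intro a b
    show a ++ ppF (b ++ "/" ++ p) rest = ppF ((a ++ b) ++ "/" ++ p) rest
    rw [ih a (b ++ "/" ++ p)]
    congr 1
    simp [String.append_assoc]

theorem ppJoin_singleton (y : String) : PySem.Str.join "/" [y] = y := by
  apply String.toList_inj.mp
  rw [PySem.Str.toList_join]
  simp [PySem.Chars.join_singleton]

theorem ppJoin_eq_ppF (qs : List String) : ∀ (q : String), PySem.Str.join "/" (q :: qs) = ppF q qs := by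
  induction qs with
  | nil => intro q; exact ppJoin_singleton q
  | cons p rest ih =>
    intro q
    have hstr : PySem.Str.join "/" (q :: p :: rest) = q ++ "/" ++ PySem.Str.join "/" (p :: rest) := by
      apply String.toList_inj.mp
      simp [PySem.Str.toList_join, PySem.Chars.join_cons_cons]
    show PySem.Str.join "/" (q :: p :: rest) = ppF (q ++ "/" ++ p) rest
    rw [hstr, ih p]
    exact ppF_pull rest (q ++ "/") p

theorem ppScan_snoc (xs : List String) : ∀ (cur y : String),
    ppScan cur (xs ++ [y]) = ppScan cur xs ++ [ppF cur (xs ++ [y])] := by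
  induction xs with
  | nil => intro cur y; rfl
  | cons p rest ih =>
    intro cur y
    show (cur ++ "/" ++ p) :: ppScan (cur ++ "/" ++ p) (rest ++ [y]) = _
    rw [ih (cur ++ "/" ++ p) y]
    rfl

theorem ppAllJ_snoc (pp : List String) (y : String) :
    ppAllJ (pp ++ [y]) = ppAllJ pp ++ [PySem.Str.join "/" (pp ++ [y])] := by
  cases pp with
  | nil => simp [ppAllJ, ppScan, ppJoin_singleton]
  | cons q qs =>
    show q :: ppScan q (qs ++ [y]) = (q :: ppScan q qs) ++ [PySem.Str.join "/" (q :: (qs ++ [y]))]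
    rw [ppScan_snoc qs q y, ppJoin_eq_ppF (qs ++ [y]) q]
    rfl

theorem ppRFind_snoc (ex : List String) (cs : List String) (c : String) :
    ppRFind ex (cs ++ [c]) = if ex.contains c then some c else ppRFind ex cs := by
  by_cases h : c ∈ ex <;>
    simp [ppRFind, h]

theorem ppSearch_cons (ex : List String) (q : String) (qs : List String) :
    ppSearch ex (q :: qs) =
      (if ex.contains (PySem.Str.join "/" (q :: qs)) then some (PySem.Str.join "/" (q :: qs))
       else ppSearch ex (q :: qs).dropLast) := by
  rw [ppSearch]

theorem ppSearch_eq_ppRFind (ex : List String) (pp : List String) :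
    ppSearch ex pp = ppRFind ex (ppAllJ pp) := by
  induction pp using List.reverseRecOn with
  | nil => simp [ppSearch, ppRFind, ppAllJ]
  | append_singleton ys y ih =>
    rw [ppAllJ_snoc, ppRFind_snoc]
    cases ys with
    | nil =>
      rw [show ([] : List String) ++ [y] = [y] from rfl, ppSearch_cons, ppJoin_singleton]
      simp [ppSearch, ppRFind, ppAllJ]
    | cons q qs =>
      rw [show (q :: qs) ++ [y] = q :: (qs ++ [y]) from rfl, ppSearch_cons]
      have hdl : (q :: (qs ++ [y])).dropLast = q :: qs := by
        rw [show q :: (qs ++ [y]) = (q :: qs) ++ [y] from rfl, List.dropLast_concat]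
      rw [hdl]
      by_cases h : PySem.Str.join "/" (q :: (qs ++ [y])) ∈ ex <;> simp [h, ih]

theorem ppRFind_cons (ex : List String) (c : String) (cs : List String) :
    ppRFind ex (c :: cs) = (ppRFind ex cs).or (if ex.contains c then some c else none) := by
  unfold ppRFind
  rw [List.reverse_cons, List.find?_append]
  by_cases h : c ∈ ex <;> simp [List.find?, h]

theorem ppGo_some (ex : List String) (parts : List String) : ∀ (cur : String) (best : Option String),
    ppGo ex parts (some cur) best = (ppRFind ex (ppScan cur (ppCollect parts))).or best := by
  induction parts with
  | nil => intro cur best; rfl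
  | cons p rest ih =>
    intro cur best
    unfold ppGo ppCollect
    cases hg : (p == "**" || (["*", "?", "[", "]"].any (fun ch => PySem.Str.isIn ch p))) with
    | true => simp [ppScan, ppRFind]
    | false =>
      simp only [Bool.false_eq_true, if_false]
      show ppGo ex rest (some (cur ++ "/" ++ p)) _
          = (ppRFind ex ((cur ++ "/" ++ p) :: ppScan (cur ++ "/" ++ p) (ppCollect rest))).or best
      rw [ih (cur ++ "/" ++ p), ppRFind_cons]
      by_cases h : (cur ++ "/" ++ p) ∈ ex <;>
        cases hf : ppRFind ex (ppScan (cur ++ "/" ++ p) (ppCollect rest)) <;> simp [h]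

theorem ppGo_eq_ppRFind (ex : List String) (parts : List String) :
    ppGo ex parts none none = ppRFind ex (ppAllJ (ppCollect parts)) := by
  cases parts with
  | nil => simp [ppGo, ppCollect, ppAllJ, ppRFind]
  | cons p rest =>
    unfold ppGo ppCollect
    cases hg : (p == "**" || (["*", "?", "[", "]"].any (fun ch => PySem.Str.isIn ch p))) with
    | true => simp [ppAllJ, ppRFind]
    | false =>
      simp only [Bool.false_eq_true, if_false]
      show ppGo ex rest (some p) (if ex.contains p then some p else none)
          = ppRFind ex (p :: ppScan p (ppCollect rest))
      rw [ppGo_some, ppRFind_cons]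

-- ===== VERDICT (by name: the statement is the Claim_ definition above) =====
theorem pattern_prefix_spec : Claim_equal_pattern_prefix := by
  intro pattern existing _
  unfold Spec_pattern_prefix pattern_prefix pattern_prefix_alt
  rw [ppSearch_eq_ppRFind, ppGo_eq_ppRFind]
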